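-- pv_equiv track=rewrite | github.com/synthsandstuff/AudioInterpolator | Audio Interpolator.py | InterpolatorAL0
-- ===== SOURCE A (Python) =====
-- def InterpolatorAL0(audio,y,z): #Implementation of the interpolation algorithms, takes a single array
--     newaudio = [0]*(len(audio)*y) #Declares a new array for the interpolated audio
--     counter = 0
--     for i in range(len(audio)):
--         for j in range(y):
--             newaudio[counter] = audio[i] #This algortihm just duplicates the sample across a few more samples, sounds the worst.
--             counter += 1
--     return newaudio
-- ===== SOURCE B (Python) =====
-- def InterpolatorAL0(audio, y, z):
--     return [audio[k // y] for k in range(len(audio) * y)]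
-- ===== Notes on version B (the rewrite author's own statement) =====
-- stated objective: simpler
-- what changed: Replaces the preallocate-and-fill nested loops with a running counter by a single flat comprehension over output indices, deriving each source index by floor division k // y.
import Mathlib
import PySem

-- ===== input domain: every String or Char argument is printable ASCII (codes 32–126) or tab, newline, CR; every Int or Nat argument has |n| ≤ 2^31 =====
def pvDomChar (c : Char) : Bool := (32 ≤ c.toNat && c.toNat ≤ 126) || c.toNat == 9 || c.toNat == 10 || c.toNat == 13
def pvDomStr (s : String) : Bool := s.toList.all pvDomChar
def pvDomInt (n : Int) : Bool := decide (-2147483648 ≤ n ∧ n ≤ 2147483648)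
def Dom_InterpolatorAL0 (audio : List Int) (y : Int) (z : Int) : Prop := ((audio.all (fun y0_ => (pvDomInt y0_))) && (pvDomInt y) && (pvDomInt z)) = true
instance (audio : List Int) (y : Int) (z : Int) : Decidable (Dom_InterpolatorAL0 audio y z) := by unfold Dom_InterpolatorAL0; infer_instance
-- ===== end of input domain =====

-- B replaces A's preallocate-and-fill nested loops (running counter) by one flat
-- comprehension over output indices, deriving the source index by floor division.

-- ===== PORT A =====
-- newaudio = [0]*(len(audio)*y); counter = 0; nested loops filling newaudio[counter]
def InterpolatorAL0 (audio : List Int) (y : Int) (_z : Int) : List Int :=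
  let newaudio : List Int := List.replicate ((audio.length : Int) * y).toNat 0
  let st :=
    (PySem.List.pyRange 0 (audio.length : Int) 1).foldl
      (fun (st : List Int × Int) i =>
        (PySem.List.pyRange 0 y 1).foldl
          (fun (st2 : List Int × Int) _j =>
            (PySem.List.pySetD st2.1 st2.2 (PySem.List.pyGetD audio i 0), st2.2 + 1))
          st)
      (newaudio, 0)
  st.1

-- ===== PORT B =====
-- [audio[k // y] for k in range(len(audio)*y)]
def InterpolatorAL0_alt (audio : List Int) (y : Int) (_z : Int) : List Int :=
  (PySem.List.pyRange 0 ((audio.length : Int) * y) 1).map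
    (fun k => PySem.List.pyGetD audio (PySem.Int.floordiv k y) 0)

-- ===== PRECONDITION & SPEC =====
def Spec_InterpolatorAL0 (audio : List Int) (y : Int) (z : Int) (out : List Int) : Prop := out = InterpolatorAL0_alt audio y z
instance (audio : List Int) (y : Int) (z : Int) (out : List Int) : Decidable (Spec_InterpolatorAL0 audio y z out) := by unfold Spec_InterpolatorAL0; infer_instance

-- ===== CLAIM (what is proved, stated in full; the proofs are below) =====
def Claim_equal_InterpolatorAL0 : Prop := ∀ (audio : List Int) (y : Int) (z : Int), Dom_InterpolatorAL0 audio y z → Spec_InterpolatorAL0 audio y z (InterpolatorAL0 audio y z)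

-- ===== LEMMAS AND PROOFS =====

-- canonical value both programs compute (for 0 < y): each sample repeated y times
def pvFlat (audio : List Int) (t : Nat) : List Int :=
  audio.flatMap (fun a => List.replicate t a)

theorem pvFlat_cons (a : Int) (xs : List Int) (t : Nat) :
    pvFlat (a :: xs) t = List.replicate t a ++ pvFlat xs t := by
  simp [pvFlat]

theorem length_pvFlat (audio : List Int) (t : Nat) :
    (pvFlat audio t).length = audio.length * t := by
  induction audio with
  | nil => simp [pvFlat]
  | cons a xs ih => simp only [pvFlat_cons, List.length_append, List.length_replicate,
      List.length_cons, ih, Nat.succ_mul]; ring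

theorem getElem_pvFlat (audio : List Int) (t : Nat) (ht : 0 < t) (k : Nat)
    (hk : k < audio.length * t) (hk2 : k / t < audio.length) :
    (pvFlat audio t)[k]'(by rw [length_pvFlat]; exact hk) = audio[k / t]'hk2 := by
  induction audio generalizing k with
  | nil => simp at hk
  | cons a xs ih =>
    rw [List.getElem_of_eq (pvFlat_cons a xs t), List.getElem_append]
    by_cases h : k < t
    · simp [h, Nat.div_eq_of_lt h]
    · have ht2 : t ≤ k := by omega
      have hk' : k - t < xs.length * t := by
        simp only [List.length_cons, Nat.succ_mul] at hk; omega
      have hdiv : k / t = (k - t) / t + 1 := Nat.div_eq_sub_div ht ht2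
      have hk2' : (k - t) / t < xs.length := by
        simp only [List.length_cons] at hk2; omega
      simp only [List.length_replicate, dif_neg (by omega : ¬ k < t)]
      rw [ih (k - t) hk' hk2']
      simp [hdiv]

theorem alt_eq_pvFlat (audio : List Int) (y z : Int) (hy : 0 < y) :
    InterpolatorAL0_alt audio y z = pvFlat audio y.toNat := by
  have hyt : ((y.toNat : Int)) = y := Int.toNat_of_nonneg (le_of_lt hy)
  have hlen : ((audio.length : Int) * y - 0).toNat = audio.length * y.toNat := by
    rw [sub_zero]
    conv_lhs => rw [← hyt]
    rw [← Int.natCast_mul, Int.toNat_natCast]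
  apply List.ext_getElem
  · simp only [InterpolatorAL0_alt, List.length_map, PySem.List.length_pyRange_one,
      length_pvFlat, hlen]
  · intro k h1 h2
    have hkn : k < audio.length * y.toNat := by rwa [length_pvFlat] at h2
    have hkdiv : k / y.toNat < audio.length :=
      Nat.div_lt_of_lt_mul (by rwa [Nat.mul_comm] at hkn)
    simp only [InterpolatorAL0_alt, List.getElem_map, PySem.List.getElem_pyRange_one]
    have hfd : PySem.Int.floordiv ((0 : Int) + (k : Int)) y = ((k / y.toNat : Nat) : Int) := by
      rw [zero_add]
      conv_lhs => rw [← hyt]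
      exact PySem.Int.floordiv_natCast k y.toNat
    rw [hfd, PySem.List.pyGetD_natCast, List.getD_eq_getElem _ _ hkdiv]
    exact (getElem_pvFlat audio y.toNat (by omega) k hkn hkdiv).symm

-- inner loop of A: t consecutive writes of the same value v starting at the counter
theorem inner_loop (v : Int) (t : Nat) (P : List Int) (r : Nat) (h : t ≤ r) :
    (PySem.List.pyRange 0 ((t : Nat) : Int) 1).foldl
      (fun (st2 : List Int × Int) _j =>
        (PySem.List.pySetD st2.1 st2.2 v, st2.2 + 1))
      (P ++ List.replicate r 0, (P.length : Int))
    = (P ++ List.replicate t v ++ List.replicate (r - t) 0, (P.length : Int) + t) := by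
  induction t with
  | zero =>
    rw [Nat.cast_zero, PySem.List.pyRange_one_eq_nil le_rfl]
    simp
  | succ m ih =>
    have hsplit : ((m + 1 : Nat) : Int) = ((m : Nat) : Int) + 1 := by push_cast; ring
    rw [hsplit, PySem.List.pyRange_one_succ_right (by positivity), List.foldl_append,
      ih (by omega)]
    simp only [List.foldl_cons, List.foldl_nil]
    have hset :
        PySem.List.pySetD (P ++ List.replicate m v ++ List.replicate (r - m) 0)
          ((P.length : Int) + (m : Nat)) v
        = P ++ List.replicate (m + 1) v ++ List.replicate (r - (m + 1)) 0 := by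
      have hcast : ((P.length : Int) + (m : Nat)) = ((P.length + m : Nat) : Int) := by
        push_cast; ring
      rw [hcast, PySem.List.pySetD_natCast]
      have hr : r - m = (r - (m + 1)) + 1 := by omega
      rw [hr, List.replicate_succ, List.set_append_right _ _ (by simp)]
      simp [List.replicate_succ' (n := m), List.append_assoc]
    rw [hset, Prod.mk.injEq]
    exact ⟨rfl, by omega⟩

-- outer loop of A after the first m samples have been processed
theorem outer_loop (audio : List Int) (y : Int) (hy : 0 < y) (m : Nat)
    (hm : m ≤ audio.length) :
    (PySem.List.pyRange 0 ((m : Nat) : Int) 1).foldl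
      (fun (st : List Int × Int) i =>
        (PySem.List.pyRange 0 y 1).foldl
          (fun (st2 : List Int × Int) _j =>
            (PySem.List.pySetD st2.1 st2.2 (PySem.List.pyGetD audio i 0), st2.2 + 1))
          st)
      (List.replicate (audio.length * y.toNat) 0, 0)
    = (pvFlat (audio.take m) y.toNat ++
        List.replicate ((audio.length - m) * y.toNat) 0,
       ((m * y.toNat : Nat) : Int)) := by
  have hyt : ((y.toNat : Int)) = y := Int.toNat_of_nonneg (le_of_lt hy)
  induction m with
  | zero => simp [PySem.List.pyRange_one_eq_nil, pvFlat]
  | succ p ih =>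
    have hsplit : ((p + 1 : Nat) : Int) = ((p : Nat) : Int) + 1 := by push_cast; ring
    rw [hsplit, PySem.List.pyRange_one_succ_right (by positivity), List.foldl_append,
      ih (by omega)]
    simp only [List.foldl_cons, List.foldl_nil]
    have hplen : (((pvFlat (audio.take p) y.toNat).length : Nat) : Int)
        = ((p * y.toNat : Nat) : Int) := by
      rw [length_pvFlat, List.length_take, Nat.min_eq_left (by omega)]
    rw [← hplen,
      show PySem.List.pyRange 0 y 1 = PySem.List.pyRange 0 ((y.toNat : Nat) : Int) 1 by
        rw [hyt],
      inner_loop (PySem.List.pyGetD audio ((p : Nat) : Int) 0) y.toNat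
        (pvFlat (audio.take p) y.toNat) ((audio.length - p) * y.toNat)
        (Nat.le_mul_of_pos_left _ (by omega))]
    have hget : PySem.List.pyGetD audio ((p : Nat) : Int) 0 = audio[p]'(by omega) := by
      rw [PySem.List.pyGetD_natCast, List.getD_eq_getElem _ _ (by omega)]
    have htake : audio.take (p + 1) = audio.take p ++ [audio[p]'(by omega)] := by
      rw [List.take_add_one]
      simp [List.getElem?_eq_getElem (show p < audio.length by omega)]
    have harith : (audio.length - p) * y.toNat - y.toNat
        = (audio.length - (p + 1)) * y.toNat := by
      rw [show audio.length - (p + 1) = (audio.length - p) - 1 by omega, Nat.sub_one_mul]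
    have hsnoc : pvFlat (audio.take p ++ [audio[p]'(by omega)]) y.toNat
        = pvFlat (audio.take p) y.toNat
          ++ List.replicate y.toNat (audio[p]'(by omega)) := by
      simp only [pvFlat, List.flatMap_append, List.flatMap_cons, List.flatMap_nil,
        List.append_nil]
    rw [Prod.mk.injEq]
    constructor
    · rw [harith, hget, htake, hsnoc]
    · rw [hplen]; push_cast; ring

-- ===== VERDICT (by name: the statement is the Claim_ definition above) =====
theorem InterpolatorAL0_spec : Claim_equal_InterpolatorAL0 := by
  intro audio y z _
  unfold Spec_InterpolatorAL0
  by_cases hy : 0 < y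
  · rw [alt_eq_pvFlat audio y z hy]
    have hyt : ((y.toNat : Int)) = y := Int.toNat_of_nonneg (le_of_lt hy)
    have hrep : ((audio.length : Int) * y).toNat = audio.length * y.toNat := by
      conv_lhs => rw [← hyt]
      rw [← Int.natCast_mul, Int.toNat_natCast]
    show (let newaudio : List Int := List.replicate ((audio.length : Int) * y).toNat 0
      let st :=
        (PySem.List.pyRange 0 (audio.length : Int) 1).foldl
          (fun (st : List Int × Int) i =>
            (PySem.List.pyRange 0 y 1).foldl
              (fun (st2 : List Int × Int) _j =>
                (PySem.List.pySetD st2.1 st2.2 (PySem.List.pyGetD audio i 0), st2.2 + 1))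
              st)
          (newaudio, 0)
      st.1) = pvFlat audio y.toNat
    simp only [hrep]
    rw [outer_loop audio y hy audio.length (le_refl _)]
    simp [pvFlat]
  · have hy' : y ≤ 0 := by omega
    have h1 : PySem.List.pyRange 0 y 1 = [] := PySem.List.pyRange_one_eq_nil hy'
    have h2 : ((audio.length : Int) * y).toNat = 0 := by
      have : (audio.length : Int) * y ≤ 0 :=
        mul_nonpos_of_nonneg_of_nonpos (by positivity) hy'
      omega
    have h3 : PySem.List.pyRange 0 ((audio.length : Int) * y) 1 = [] :=
      PySem.List.pyRange_one_eq_nil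
        (mul_nonpos_of_nonneg_of_nonpos (by positivity) hy')
    unfold InterpolatorAL0 InterpolatorAL0_alt
    simp [h1, h2, h3, List.foldl_fixed]
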